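-- pv_equiv track=rewrite | github.com/guhask/trustclaim-ai | agents/grievance_agent.py | _build_arguments
-- ===== SOURCE A (Python) =====
-- def _build_arguments(rd: dict, policy_data: dict) -> list:
--     """Map rejection reason to IRDAI regulations the insurer may have violated."""
--     arguments = []
--     reason = str(rd.get("rejection_reason", "")).lower()
--
--     # Vague rejection — IRDAI mandates specific written reason
--     arguments.append({
--         "argument":  "Right to Written Rejection with Specific Clause",
--         "irdai_ref": "IRDAI/HLT/CIR/2020/154",
--         "law":       "IRDAI regulations require that claim rejections must cite "
--                      "the exact policy clause or regulation violated. Verbal or "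
--                      "vague rejections without written specific grounds are invalid.",
--         "strength":  "HIGH"
--     })
--
--     # Settlement timeline violation
--     arguments.append({
--         "argument":  "Claim Settlement Timeline Violation",
--         "irdai_ref": "IRDAI/HLT/CIR/2024/017",
--         "law":       "Under IRDAI mandate, all health insurance claims must be "
--                      "settled within 30 days of receiving the last necessary document. "
--                      "Delays attract penal interest at 2% above bank rate per annum.",
--         "strength":  "HIGH"
--     })
--
--     # PED-related rejection
--     if any(w in reason for w in ["pre-existing", "ped", "pre existing",
--                                   "prior condition", "pre-condition"]):
--         arguments.append({
--             "argument":  "Pre-Existing Disease Disclosure Was Complete",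
--             "irdai_ref": "IRDAI/HLT/REG/2016/143 Clause 4",
--             "law":       "IRDAI defines PED as conditions diagnosed within 48 months "
--                          "prior to policy inception. Insurer must demonstrate the condition "
--                          "was diagnosed before policy start date with medical evidence. "
--                          "PED waiting period cannot exceed 48 months under IRDAI.",
--             "strength":  "HIGH"
--         })
--
--     # Documentation rejection
--     if any(w in reason for w in ["document", "incomplete", "missing",
--                                   "insufficient", "records"]):
--         arguments.append({
--             "argument":  "Cannot Reject for Documents Beyond Standard List",
--             "irdai_ref": "IRDAI/HLT/CIR/2021/189",
--             "law":       "IRDAI mandates that insurers cannot reject a claim solely "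
--                          "for want of additional documents beyond the standard required list. "
--                          "The standard document checklist is prescribed by IRDAI and is exhaustive.",
--             "strength":  "HIGH"
--         })
--
--     # Exclusion-based rejection
--     if any(w in reason for w in ["excluded", "exclusion", "not covered",
--                                   "not payable"]):
--         arguments.append({
--             "argument":  "Exclusion Not Clearly Disclosed at Policy Inception",
--             "irdai_ref": "IRDAI/HLT/REG/2016/143 Schedule II",
--             "law":       "IRDAI requires all exclusions to be clearly communicated "
--                          "to the policyholder at the time of policy issuance. Exclusions "
--                          "not explicitly disclosed in the policy schedule cannot be invoked "
--                          "to reject a claim.",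
--             "strength":  "MEDIUM"
--         })
--
--     # Cashless/pre-auth rejection
--     if any(w in reason for w in ["cashless", "pre-auth", "pre auth",
--                                   "authorization", "network"]):
--         arguments.append({
--             "argument":  "Cashless Pre-Authorization Timeline Violated",
--             "irdai_ref": "IRDAI/HLT/CIR/2023/205",
--             "law":       "IRDAI Master Circular 2023 mandates cashless authorization "
--                          "within 1 hour for planned admissions and 30 minutes for emergencies. "
--                          "Failure to respond within this timeline is a regulatory violation.",
--             "strength":  "HIGH"
--         })
--
--     # Waiting period rejection
--     if any(w in reason for w in ["waiting period", "waiting", "inception",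
--                                   "30 days", "initial"]):
--         arguments.append({
--             "argument":  "Treatment Was for Accidental Injury — Waiting Period Not Applicable",
--             "irdai_ref": "IRDAI/HLT/REG/2016/143",
--             "law":       "The initial 30-day waiting period does not apply to accidental "
--                          "injuries requiring immediate hospitalisation. If treatment was "
--                          "accident-related, the waiting period exclusion cannot be applied.",
--             "strength":  "MEDIUM"
--         })
--
--     # Ombudsman right — always include
--     arguments.append({
--         "argument":  "Right to Approach Insurance Ombudsman",
--         "irdai_ref": "IRDAI Ombudsman Rules 2017",
--         "law":       "If the insurer does not resolve the grievance within 30 days, "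
--                      "the policyholder has the right to approach the Insurance Ombudsman "
--                      "free of cost within 1 year of the rejection date. The Ombudsman "
--                      "decision is binding on the insurer.",
--         "strength":  "HIGH"
--     })
--
--     return arguments
-- ===== SOURCE B (Python) =====
-- # Inverted-index rewrite: pass 1 scans one flat (keyword -> tag) list and collects
-- # the set of matched tags; pass 2 emits the arguments whose tag was hit (or is mandatory).
--
-- _ARGS = {
--     "vague": {
--         "argument":  "Right to Written Rejection with Specific Clause",
--         "irdai_ref": "IRDAI/HLT/CIR/2020/154",
--         "law":       "IRDAI regulations require that claim rejections must cite "
--                      "the exact policy clause or regulation violated. Verbal or "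
--                      "vague rejections without written specific grounds are invalid.",
--         "strength":  "HIGH"
--     },
--     "timeline": {
--         "argument":  "Claim Settlement Timeline Violation",
--         "irdai_ref": "IRDAI/HLT/CIR/2024/017",
--         "law":       "Under IRDAI mandate, all health insurance claims must be "
--                      "settled within 30 days of receiving the last necessary document. "
--                      "Delays attract penal interest at 2% above bank rate per annum.",
--         "strength":  "HIGH"
--     },
--     "ped": {
--         "argument":  "Pre-Existing Disease Disclosure Was Complete",
--         "irdai_ref": "IRDAI/HLT/REG/2016/143 Clause 4",
--         "law":       "IRDAI defines PED as conditions diagnosed within 48 months "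
--                      "prior to policy inception. Insurer must demonstrate the condition "
--                      "was diagnosed before policy start date with medical evidence. "
--                      "PED waiting period cannot exceed 48 months under IRDAI.",
--         "strength":  "HIGH"
--     },
--     "doc": {
--         "argument":  "Cannot Reject for Documents Beyond Standard List",
--         "irdai_ref": "IRDAI/HLT/CIR/2021/189",
--         "law":       "IRDAI mandates that insurers cannot reject a claim solely "
--                      "for want of additional documents beyond the standard required list. "
--                      "The standard document checklist is prescribed by IRDAI and is exhaustive.",
--         "strength":  "HIGH"
--     },
--     "excl": {
--         "argument":  "Exclusion Not Clearly Disclosed at Policy Inception",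
--         "irdai_ref": "IRDAI/HLT/REG/2016/143 Schedule II",
--         "law":       "IRDAI requires all exclusions to be clearly communicated "
--                      "to the policyholder at the time of policy issuance. Exclusions "
--                      "not explicitly disclosed in the policy schedule cannot be invoked "
--                      "to reject a claim.",
--         "strength":  "MEDIUM"
--     },
--     "cashless": {
--         "argument":  "Cashless Pre-Authorization Timeline Violated",
--         "irdai_ref": "IRDAI/HLT/CIR/2023/205",
--         "law":       "IRDAI Master Circular 2023 mandates cashless authorization "
--                      "within 1 hour for planned admissions and 30 minutes for emergencies. "
--                      "Failure to respond within this timeline is a regulatory violation.",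
--         "strength":  "HIGH"
--     },
--     "waiting": {
--         "argument":  "Treatment Was for Accidental Injury — Waiting Period Not Applicable",
--         "irdai_ref": "IRDAI/HLT/REG/2016/143",
--         "law":       "The initial 30-day waiting period does not apply to accidental "
--                      "injuries requiring immediate hospitalisation. If treatment was "
--                      "accident-related, the waiting period exclusion cannot be applied.",
--         "strength":  "MEDIUM"
--     },
--     "ombudsman": {
--         "argument":  "Right to Approach Insurance Ombudsman",
--         "irdai_ref": "IRDAI Ombudsman Rules 2017",
--         "law":       "If the insurer does not resolve the grievance within 30 days, "
--                      "the policyholder has the right to approach the Insurance Ombudsman "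
--                      "free of cost within 1 year of the rejection date. The Ombudsman "
--                      "decision is binding on the insurer.",
--         "strength":  "HIGH"
--     },
-- }
--
-- # flat inverted index: keyword -> tag of the argument it triggers
-- _KW_TAGS = [
--     ("pre-existing", "ped"), ("ped", "ped"), ("pre existing", "ped"),
--     ("prior condition", "ped"), ("pre-condition", "ped"),
--     ("document", "doc"), ("incomplete", "doc"), ("missing", "doc"),
--     ("insufficient", "doc"), ("records", "doc"),
--     ("excluded", "excl"), ("exclusion", "excl"), ("not covered", "excl"),
--     ("not payable", "excl"),
--     ("cashless", "cashless"), ("pre-auth", "cashless"), ("pre auth", "cashless"),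
--     ("authorization", "cashless"), ("network", "cashless"),
--     ("waiting period", "waiting"), ("waiting", "waiting"), ("inception", "waiting"),
--     ("30 days", "waiting"), ("initial", "waiting"),
-- ]
--
-- # emission order; None tag = mandatory
-- _ORDER = ["vague", "timeline", "ped", "doc", "excl", "cashless", "waiting", "ombudsman"]
-- _MANDATORY = {"vague", "timeline", "ombudsman"}
--
-- def _build_arguments(rd: dict, policy_data: dict) -> list:
--     reason = str(rd.get("rejection_reason", "")).lower()
--     hits = {tag for kw, tag in _KW_TAGS if kw in reason}
--     return [_ARGS[t] for t in _ORDER if t in _MANDATORY or t in hits]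
-- ===== Notes on version B (the rewrite author's own statement) =====
-- stated objective: alternative
-- what changed: Replaced A's seven inline conditional appends with an inverted keyword->tag index scanned in a first pass to collect the set of matched tags, then a second pass emitting the arguments whose tag is mandatory or was hit.
import Mathlib
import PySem

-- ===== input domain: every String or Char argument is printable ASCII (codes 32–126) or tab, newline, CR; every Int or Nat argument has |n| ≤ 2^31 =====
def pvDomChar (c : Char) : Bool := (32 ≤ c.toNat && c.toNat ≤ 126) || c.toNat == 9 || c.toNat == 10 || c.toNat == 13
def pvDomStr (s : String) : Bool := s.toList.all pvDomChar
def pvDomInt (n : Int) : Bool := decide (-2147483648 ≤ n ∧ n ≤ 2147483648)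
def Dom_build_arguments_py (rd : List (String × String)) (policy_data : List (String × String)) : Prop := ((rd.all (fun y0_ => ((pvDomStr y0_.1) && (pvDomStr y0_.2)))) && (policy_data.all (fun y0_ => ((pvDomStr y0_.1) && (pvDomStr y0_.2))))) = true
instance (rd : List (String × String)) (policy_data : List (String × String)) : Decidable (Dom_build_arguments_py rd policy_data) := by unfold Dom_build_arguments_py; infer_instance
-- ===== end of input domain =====

-- B replaces A's seven inline conditional appends with an inverted keyword->tag index:
-- a first pass collects the set of matched tags, a second pass emits the arguments (objective: alternative).

-- Shared literal constants (the argument dicts, in A's order):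
def dVague : List (String × String) := [("argument", "Right to Written Rejection with Specific Clause"), ("irdai_ref", "IRDAI/HLT/CIR/2020/154"), ("law", "IRDAI regulations require that claim rejections must cite the exact policy clause or regulation violated. Verbal or vague rejections without written specific grounds are invalid."), ("strength", "HIGH")]

def dTimeline : List (String × String) := [("argument", "Claim Settlement Timeline Violation"), ("irdai_ref", "IRDAI/HLT/CIR/2024/017"), ("law", "Under IRDAI mandate, all health insurance claims must be settled within 30 days of receiving the last necessary document. Delays attract penal interest at 2% above bank rate per annum."), ("strength", "HIGH")]

def dPED : List (String × String) := [("argument", "Pre-Existing Disease Disclosure Was Complete"), ("irdai_ref", "IRDAI/HLT/REG/2016/143 Clause 4"), ("law", "IRDAI defines PED as conditions diagnosed within 48 months prior to policy inception. Insurer must demonstrate the condition was diagnosed before policy start date with medical evidence. PED waiting period cannot exceed 48 months under IRDAI."), ("strength", "HIGH")]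

def dDoc : List (String × String) := [("argument", "Cannot Reject for Documents Beyond Standard List"), ("irdai_ref", "IRDAI/HLT/CIR/2021/189"), ("law", "IRDAI mandates that insurers cannot reject a claim solely for want of additional documents beyond the standard required list. The standard document checklist is prescribed by IRDAI and is exhaustive."), ("strength", "HIGH")]

def dExcl : List (String × String) := [("argument", "Exclusion Not Clearly Disclosed at Policy Inception"), ("irdai_ref", "IRDAI/HLT/REG/2016/143 Schedule II"), ("law", "IRDAI requires all exclusions to be clearly communicated to the policyholder at the time of policy issuance. Exclusions not explicitly disclosed in the policy schedule cannot be invoked to reject a claim."), ("strength", "MEDIUM")]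

def dCash : List (String × String) := [("argument", "Cashless Pre-Authorization Timeline Violated"), ("irdai_ref", "IRDAI/HLT/CIR/2023/205"), ("law", "IRDAI Master Circular 2023 mandates cashless authorization within 1 hour for planned admissions and 30 minutes for emergencies. Failure to respond within this timeline is a regulatory violation."), ("strength", "HIGH")]

def dWait : List (String × String) := [("argument", "Treatment Was for Accidental Injury — Waiting Period Not Applicable"), ("irdai_ref", "IRDAI/HLT/REG/2016/143"), ("law", "The initial 30-day waiting period does not apply to accidental injuries requiring immediate hospitalisation. If treatment was accident-related, the waiting period exclusion cannot be applied."), ("strength", "MEDIUM")]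

def dOmbud : List (String × String) := [("argument", "Right to Approach Insurance Ombudsman"), ("irdai_ref", "IRDAI Ombudsman Rules 2017"), ("law", "If the insurer does not resolve the grievance within 30 days, the policyholder has the right to approach the Insurance Ombudsman free of cost within 1 year of the rejection date. The Ombudsman decision is binding on the insurer."), ("strength", "HIGH")]

-- ===== PORT A =====
def kwPED : List String := ["pre-existing", "ped", "pre existing", "prior condition", "pre-condition"]
def kwDoc : List String := ["document", "incomplete", "missing", "insufficient", "records"]
def kwExcl : List String := ["excluded", "exclusion", "not covered", "not payable"]
def kwCash : List String := ["cashless", "pre-auth", "pre auth", "authorization", "network"]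
def kwWait : List String := ["waiting period", "waiting", "inception", "30 days", "initial"]

def build_arguments_py (rd : List (String × String)) (policy_data : List (String × String)) : List (List (String × String)) :=
  let reason := PySem.Str.lower (PySem.Dict.getD ⟨rd⟩ "rejection_reason" "")
  let arguments : List (List (String × String)) := []
  let arguments := arguments ++ [dVague]
  let arguments := arguments ++ [dTimeline]
  let arguments := if kwPED.any (fun w => PySem.Str.isIn w reason) then arguments ++ [dPED] else arguments
  let arguments := if kwDoc.any (fun w => PySem.Str.isIn w reason) then arguments ++ [dDoc] else arguments
  let arguments := if kwExcl.any (fun w => PySem.Str.isIn w reason) then arguments ++ [dExcl] else arguments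
  let arguments := if kwCash.any (fun w => PySem.Str.isIn w reason) then arguments ++ [dCash] else arguments
  let arguments := if kwWait.any (fun w => PySem.Str.isIn w reason) then arguments ++ [dWait] else arguments
  arguments ++ [dOmbud]

-- ===== PORT B =====
-- flat inverted index: keyword -> tag of the argument it triggers
def bKwTags : List (String × String) :=
  [("pre-existing", "ped"), ("ped", "ped"), ("pre existing", "ped"),
   ("prior condition", "ped"), ("pre-condition", "ped"),
   ("document", "doc"), ("incomplete", "doc"), ("missing", "doc"),
   ("insufficient", "doc"), ("records", "doc"),
   ("excluded", "excl"), ("exclusion", "excl"), ("not covered", "excl"),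
   ("not payable", "excl"),
   ("cashless", "cashless"), ("pre-auth", "cashless"), ("pre auth", "cashless"),
   ("authorization", "cashless"), ("network", "cashless"),
   ("waiting period", "waiting"), ("waiting", "waiting"), ("inception", "waiting"),
   ("30 days", "waiting"), ("initial", "waiting")]

-- emission order; mandatory tags are always emitted
def bOrder : List String := ["vague", "timeline", "ped", "doc", "excl", "cashless", "waiting", "ombudsman"]
def bMandatory : PySem.Set String := PySem.Set.ofList ["vague", "timeline", "ombudsman"]

def bArg (t : String) : List (String × String) :=
  if t == "vague" then dVague else if t == "timeline" then dTimeline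
  else if t == "ped" then dPED else if t == "doc" then dDoc
  else if t == "excl" then dExcl else if t == "cashless" then dCash
  else if t == "waiting" then dWait else dOmbud

def build_arguments_py_alt (rd : List (String × String)) (policy_data : List (String × String)) : List (List (String × String)) :=
  let reason := PySem.Str.lower (PySem.Dict.getD ⟨rd⟩ "rejection_reason" "")
  let hits : PySem.Set String :=
    PySem.Set.ofList ((bKwTags.filter (fun p => PySem.Str.isIn p.1 reason)).map Prod.snd)
  (bOrder.filter (fun t => bMandatory.contains t || hits.contains t)).map bArg

-- ===== PRECONDITION & SPEC =====
def Spec_build_arguments_py (rd : List (String × String)) (policy_data : List (String × String)) (out : List (List (String × String))) : Prop := out = build_arguments_py_alt rd policy_data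
instance (rd : List (String × String)) (policy_data : List (String × String)) (out : List (List (String × String))) : Decidable (Spec_build_arguments_py rd policy_data out) := by unfold Spec_build_arguments_py; infer_instance

-- ===== CLAIM (what is proved, stated in full; the proofs are below) =====
def Claim_equal_build_arguments_py : Prop := ∀ (rd : List (String × String)) (policy_data : List (String × String)), Dom_build_arguments_py rd policy_data → Spec_build_arguments_py rd policy_data (build_arguments_py rd policy_data)

-- ===== LEMMAS AND PROOFS =====
theorem hits_contains_eq (reason t : String) :
    (PySem.Set.ofList ((bKwTags.filter (fun p => PySem.Str.isIn p.1 reason)).map Prod.snd)).contains t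
      = bKwTags.any (fun p => PySem.Str.isIn p.1 reason && p.2 == t) := by
  rw [Bool.eq_iff_iff]
  simp [PySem.Set.contains, PySem.Set.mem_ofList, List.mem_map, List.mem_filter, List.any_eq_true]

theorem any_ped (r : String) : (bKwTags.any fun p => PySem.Str.isIn p.1 r && p.2 == "ped") = kwPED.any (fun w => PySem.Str.isIn w r) := by
  simp [bKwTags, kwPED]
theorem any_doc (r : String) : (bKwTags.any fun p => PySem.Str.isIn p.1 r && p.2 == "doc") = kwDoc.any (fun w => PySem.Str.isIn w r) := by
  simp [bKwTags, kwDoc]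
theorem any_excl (r : String) : (bKwTags.any fun p => PySem.Str.isIn p.1 r && p.2 == "excl") = kwExcl.any (fun w => PySem.Str.isIn w r) := by
  simp [bKwTags, kwExcl]
theorem any_cash (r : String) : (bKwTags.any fun p => PySem.Str.isIn p.1 r && p.2 == "cashless") = kwCash.any (fun w => PySem.Str.isIn w r) := by
  simp [bKwTags, kwCash]
theorem any_wait (r : String) : (bKwTags.any fun p => PySem.Str.isIn p.1 r && p.2 == "waiting") = kwWait.any (fun w => PySem.Str.isIn w r) := by
  simp [bKwTags, kwWait]
theorem any_vague (r : String) : (bKwTags.any fun p => PySem.Str.isIn p.1 r && p.2 == "vague") = false := by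
  simp [bKwTags]
theorem any_timeline (r : String) : (bKwTags.any fun p => PySem.Str.isIn p.1 r && p.2 == "timeline") = false := by
  simp [bKwTags]
theorem any_ombud (r : String) : (bKwTags.any fun p => PySem.Str.isIn p.1 r && p.2 == "ombudsman") = false := by
  simp [bKwTags]
theorem mand_vague : bMandatory.contains "vague" = true := rfl
theorem mand_timeline : bMandatory.contains "timeline" = true := rfl
theorem mand_ombud : bMandatory.contains "ombudsman" = true := rfl
theorem mand_ped : bMandatory.contains "ped" = false := rfl
theorem mand_doc : bMandatory.contains "doc" = false := rfl
theorem mand_excl : bMandatory.contains "excl" = false := rfl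
theorem mand_cash : bMandatory.contains "cashless" = false := rfl
theorem mand_wait : bMandatory.contains "waiting" = false := rfl

-- ===== VERDICT (by name: the statement is the Claim_ definition above) =====
theorem build_arguments_py_spec : Claim_equal_build_arguments_py := by
  intro rd policy_data _
  unfold Spec_build_arguments_py build_arguments_py build_arguments_py_alt
  generalize PySem.Str.lower (PySem.Dict.getD ⟨rd⟩ "rejection_reason" "") = r
  simp only [bOrder, List.filter_cons, List.filter_nil]
  simp only [hits_contains_eq, any_ped, any_doc, any_excl, any_cash, any_wait,
    any_vague, any_timeline, any_ombud, mand_vague, mand_timeline, mand_ombud,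
    mand_ped, mand_doc, mand_excl, mand_cash, mand_wait,
    Bool.true_or, Bool.false_or, Bool.or_false]
  generalize kwPED.any (fun w => PySem.Str.isIn w r) = c1
  generalize kwDoc.any (fun w => PySem.Str.isIn w r) = c2
  generalize kwExcl.any (fun w => PySem.Str.isIn w r) = c3
  generalize kwCash.any (fun w => PySem.Str.isIn w r) = c4
  generalize kwWait.any (fun w => PySem.Str.isIn w r) = c5
  cases c1 <;> cases c2 <;> cases c3 <;> cases c4 <;> cases c5 <;> rfl
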